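-- pv_equiv track=rewrite | github.com/sz3lp/ospreyexterior | scripts/batch_seo_update.py | get_adjacent_cities
-- ===== SOURCE A (Python) =====
-- from typing import Dict, List
--
-- def get_adjacent_cities(city_slug: str, city_slugs: List[str]) -> List[str]:
--     if city_slug not in city_slugs:
--         return []
--     idx = city_slugs.index(city_slug)
--     max_count = 5
--     min_count = 3
--     ordered_indices = [i for i in range(len(city_slugs)) if i != idx]
--     ordered_indices.sort(key=lambda i: (abs(i - idx), i))
--     selected_indices = ordered_indices[:max_count]
--     if len(selected_indices) < min_count:
--         selected_indices = ordered_indices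
--     selected_indices.sort()
--     return [city_slugs[i] for i in selected_indices]
-- ===== SOURCE B (Python) =====
-- def get_adjacent_cities(city_slug, city_slugs):
--     try:
--         idx = city_slugs.index(city_slug)
--     except ValueError:
--         return []
--     n = len(city_slugs)
--     l, r = idx - 1, idx + 1
--     count = 0
--     while count < 5 and (l >= 0 or r < n):
--         if l >= 0 and (r >= n or idx - l <= r - idx):
--             l -= 1
--         else:
--             r += 1
--         count += 1
--     return city_slugs[l + 1:idx] + city_slugs[idx + 1:r]
-- ===== Notes on version B (the rewrite author's own statement) =====
-- stated objective: alternative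
-- what changed: B replaces A's full sort of all indices by key (abs distance, index) with a single .index scan plus a two-pointer outward expansion from idx that takes at most 5 steps and returns two contiguous slices, so no index list is built and nothing is sorted.
import Mathlib
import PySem

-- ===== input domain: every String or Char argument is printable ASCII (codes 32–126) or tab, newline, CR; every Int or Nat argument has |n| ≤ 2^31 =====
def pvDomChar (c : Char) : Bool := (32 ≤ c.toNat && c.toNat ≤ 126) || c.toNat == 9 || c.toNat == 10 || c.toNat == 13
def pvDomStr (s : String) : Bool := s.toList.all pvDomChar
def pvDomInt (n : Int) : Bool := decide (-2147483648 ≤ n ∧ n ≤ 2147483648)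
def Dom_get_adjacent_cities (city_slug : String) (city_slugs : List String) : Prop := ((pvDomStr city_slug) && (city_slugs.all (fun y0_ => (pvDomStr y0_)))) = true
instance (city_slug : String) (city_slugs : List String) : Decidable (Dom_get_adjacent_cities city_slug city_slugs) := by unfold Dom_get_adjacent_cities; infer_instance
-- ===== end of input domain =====

-- B replaces A's full sort of all indices by key (abs distance, index) with a two-pointer
-- outward expansion from idx (at most 5 steps) returning two contiguous slices; objective:
-- alternative (no index list is built and nothing is sorted).

-- ===== PORT A =====
def get_adjacent_cities (city_slug : String) (city_slugs : List String) : List String :=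
  if city_slug ∉ city_slugs then []
  else
    match PySem.List.index? city_slugs city_slug with
    | none => []  -- unreachable: .index is guarded by the membership test above
    | some i =>
      let idx : Int := (i : Int)
      let ordered_indices : List Int :=
        (PySem.List.pyRange 0 (city_slugs.length : Int) 1).filter (fun j => decide (j ≠ idx))
      let ordered_sorted : List Int :=
        PySem.List.sorted2 ordered_indices (fun j => |j - idx|) (fun j => j) false
      let selected : List Int := ordered_sorted.take 5
      let selected : List Int := if selected.length < 3 then ordered_sorted else selected
      let selected_sorted : List Int := PySem.List.sorted selected (fun j => j) false
      selected_sorted.map (fun j => PySem.List.pyGetD city_slugs j "")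

-- ===== PORT B =====
-- the `while count < 5 and (l >= 0 or r < n)` loop of Source B; fuel = 5 - count
def pvBLoop (idx n : Int) : Nat → Int × Int → Int × Int
  | 0, s => s
  | c + 1, (l, r) =>
    if 0 ≤ l ∨ r < n then
      if 0 ≤ l ∧ (n ≤ r ∨ idx - l ≤ r - idx) then pvBLoop idx n c (l - 1, r)
      else pvBLoop idx n c (l, r + 1)
    else (l, r)

def get_adjacent_cities_alt (city_slug : String) (city_slugs : List String) : List String :=
  -- try: idx = city_slugs.index(city_slug) / except ValueError: return []
  match PySem.List.index? city_slugs city_slug with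
  | none => []
  | some i =>
      let idx : Int := (i : Int)
      let n : Int := (city_slugs.length : Int)
      let lr : Int × Int := pvBLoop idx n 5 (idx - 1, idx + 1)
      PySem.List.slice city_slugs (some (lr.1 + 1)) (some idx) ++
        PySem.List.slice city_slugs (some (idx + 1)) (some lr.2)

-- ===== PRECONDITION & SPEC =====
def Spec_get_adjacent_cities (city_slug : String) (city_slugs : List String) (out : List String) : Prop := out = get_adjacent_cities_alt city_slug city_slugs
instance (city_slug : String) (city_slugs : List String) (out : List String) : Decidable (Spec_get_adjacent_cities city_slug city_slugs out) := by unfold Spec_get_adjacent_cities; infer_instance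

-- ===== CLAIM (what is proved, stated in full; the proofs are below) =====
def Claim_equal_get_adjacent_cities : Prop := ∀ (city_slug : String) (city_slugs : List String), Dom_get_adjacent_cities city_slug city_slugs → Spec_get_adjacent_cities city_slug city_slugs (get_adjacent_cities city_slug city_slugs)

-- ===== LEMMAS AND PROOFS =====

-- the lexicographic sort key of A, as a single Lex-valued key
def pvKey (idx j : Int) : Lex (Int × Int) := toLex (|j - idx|, j)

-- the candidate pool held by B's two pointers: indices ≤ l and indices ≥ r
def pvCands (n l r : Int) : List Int :=
  PySem.List.pyRange 0 (l + 1) 1 ++ PySem.List.pyRange r n 1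

theorem pvKey_lt_iff (idx a b : Int) :
    pvKey idx a < pvKey idx b ↔ |a - idx| < |b - idx| ∨ (|a - idx| = |b - idx| ∧ a < b) := by
  simp [pvKey, Prod.Lex.toLex_lt_toLex]

theorem pvKey_inj (idx : Int) : Function.Injective (pvKey idx) := by
  intro a b h
  exact (show |a - idx| = |b - idx| ∧ a = b by simpa [pvKey, Prod.ext_iff] using h).2

-- A's sorted2 with tuple key (|j-idx|, j) is sorted with the single Lex key pvKey
theorem pvSorted2_eq_sorted (xs : List Int) (idx : Int) :
    PySem.List.sorted2 xs (fun j => |j - idx|) (fun j => j) false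
      = PySem.List.sorted xs (pvKey idx) false := by
  rw [PySem.List.sorted_eq_foldl_insertBy]
  show List.foldl (fun acc x => PySem.List.insertBy _ x acc) [] xs
      = List.foldl (fun acc x => PySem.List.insertBy _ x acc) [] xs
  have hpred : (fun (a b : Int) =>
        (decide (|a - idx| < |b - idx|) || (!decide (|b - idx| < |a - idx|) && decide (a < b))))
      = fun a b => decide (pvKey idx a < pvKey idx b) := by
    funext a b
    by_cases h1 : |a - idx| < |b - idx| <;> by_cases h2 : |b - idx| < |a - idx| <;>
      by_cases h3 : a < b <;> simp [pvKey_lt_iff, h1, h2, h3] <;> omega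
  rw [hpred]
  simp

theorem pvNodup_cands (n l r : Int) (hlr : l < r) : (pvCands n l r).Nodup := by
  unfold pvCands
  refine List.Nodup.append (PySem.List.nodup_pyRange_one _ _) (PySem.List.nodup_pyRange_one _ _) ?_
  intro x hx hy
  rw [PySem.List.mem_pyRange_one] at hx hy
  omega

theorem pvSorted_pairwise_lt (xs : List Int) (idx : Int) (hnd : xs.Nodup) :
    (PySem.List.sorted xs (pvKey idx) false).Pairwise (fun a b => pvKey idx a < pvKey idx b) := by
  have h1 := PySem.List.sorted_pairwise xs (pvKey idx)
  have h2 : (PySem.List.sorted xs (pvKey idx) false).Nodup :=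
    (PySem.List.sorted_perm xs (pvKey idx) false).nodup_iff.mpr hnd
  exact (h1.and h2).imp (fun h => lt_of_le_of_ne h.1 (fun he => h.2 (pvKey_inj idx he)))

-- extracting the left pointer as the head of the sorted candidate pool
theorem pvSorted_cands_cons_left (idx n l r : Int) (hl : 0 ≤ l) (hli : l < idx) (hir : idx < r)
    (hcond : n ≤ r ∨ idx - l ≤ r - idx) :
    PySem.List.sorted (pvCands n l r) (pvKey idx) false
      = l :: PySem.List.sorted (pvCands n (l - 1) r) (pvKey idx) false := by
  apply PySem.List.sorted_eq_of_perm_of_pairwise_lt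
  · refine List.Perm.trans (List.Perm.cons l (PySem.List.sorted_perm _ _ _)) ?_
    have h1 : pvCands n l r = PySem.List.pyRange 0 l 1 ++ l :: PySem.List.pyRange r n 1 := by
      unfold pvCands
      rw [PySem.List.pyRange_one_append 0 l (l + 1) hl (by omega), PySem.List.pyRange_one_singleton]
      simp
    have h2 : pvCands n (l - 1) r = PySem.List.pyRange 0 l 1 ++ PySem.List.pyRange r n 1 := by
      unfold pvCands
      congr 2
      omega
    rw [h1, h2]
    exact List.perm_middle.symm
  · rw [List.pairwise_cons]
    constructor
    · intro y hy
      rw [PySem.List.mem_sorted] at hy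
      unfold pvCands at hy
      rcases List.mem_append.mp hy with hy | hy <;> rw [PySem.List.mem_pyRange_one] at hy <;>
        rw [pvKey_lt_iff]
      · rw [abs_of_nonpos (by omega), abs_of_nonpos (by omega)]
        omega
      · rw [abs_of_nonpos (by omega), abs_of_nonneg (by omega)]
        omega
    · exact pvSorted_pairwise_lt _ _ (pvNodup_cands n (l - 1) r (by omega))

-- extracting the right pointer as the head of the sorted candidate pool
theorem pvSorted_cands_cons_right (idx n l r : Int) (hli : l < idx) (hir : idx < r) (hrn : r < n)
    (hcond : ¬(0 ≤ l ∧ (n ≤ r ∨ idx - l ≤ r - idx))) :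
    PySem.List.sorted (pvCands n l r) (pvKey idx) false
      = r :: PySem.List.sorted (pvCands n l (r + 1)) (pvKey idx) false := by
  apply PySem.List.sorted_eq_of_perm_of_pairwise_lt
  · refine List.Perm.trans (List.Perm.cons r (PySem.List.sorted_perm _ _ _)) ?_
    have h1 : pvCands n l r = PySem.List.pyRange 0 (l + 1) 1 ++ r :: PySem.List.pyRange (r + 1) n 1 := by
      unfold pvCands
      rw [PySem.List.pyRange_one_cons hrn]
    rw [h1]
    unfold pvCands
    exact List.perm_middle.symm
  · rw [List.pairwise_cons]
    constructor
    · intro y hy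
      rw [PySem.List.mem_sorted] at hy
      unfold pvCands at hy
      rcases List.mem_append.mp hy with hy | hy <;> rw [PySem.List.mem_pyRange_one] at hy <;>
        rw [pvKey_lt_iff]
      · rw [abs_of_nonneg (by omega), abs_of_nonpos (by omega)]
        omega
      · rw [abs_of_nonneg (by omega), abs_of_nonneg (by omega)]
        omega
    · exact pvSorted_pairwise_lt _ _ (pvNodup_cands n l (r + 1) (by omega))

theorem pvBLoop_bounds (idx n : Int) (c : Nat) :
    ∀ l r : Int, -1 ≤ l → r ≤ n →
      -1 ≤ (pvBLoop idx n c (l, r)).1 ∧ (pvBLoop idx n c (l, r)).1 ≤ l ∧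
        r ≤ (pvBLoop idx n c (l, r)).2 ∧ (pvBLoop idx n c (l, r)).2 ≤ n := by
  induction c with
  | zero => intro l r h1 h2; simp [pvBLoop]; omega
  | succ c ih =>
    intro l r h1 h2
    show _ ∧ _
    unfold pvBLoop
    split_ifs with hc hin
    · have := ih (l - 1) r (by omega) h2
      omega
    · have hr : r < n := by omega
      have := ih l (r + 1) h1 (by omega)
      omega
    · simp; omega

-- the first c elements of A's sorted stream are exactly the indices B's loop consumes
theorem pvTake_perm (idx n : Int) (c : Nat) :
    ∀ l r : Int, -1 ≤ l → l < idx → idx < r → r ≤ n →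
      ((PySem.List.sorted (pvCands n l r) (pvKey idx) false).take c).Perm
        (PySem.List.pyRange ((pvBLoop idx n c (l, r)).1 + 1) (l + 1) 1 ++
          PySem.List.pyRange r ((pvBLoop idx n c (l, r)).2) 1) := by
  induction c with
  | zero =>
    intro l r h1 h2 h3 h4
    simp [pvBLoop, PySem.List.pyRange_one_eq_nil (le_refl (l + 1)), PySem.List.pyRange_one_eq_nil (le_refl r)]
  | succ c ih =>
    intro l r h1 h2 h3 h4
    by_cases hc : (0 ≤ l ∨ r < n)
    · by_cases hin : (0 ≤ l ∧ (n ≤ r ∨ idx - l ≤ r - idx))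
      · -- take the left pointer
        have hrec : pvBLoop idx n (c + 1) (l, r) = pvBLoop idx n c (l - 1, r) := by
          conv_lhs => rw [pvBLoop]
          rw [if_pos hc, if_pos hin]
        rw [hrec, pvSorted_cands_cons_left idx n l r hin.1 h2 h3 hin.2, List.take_succ_cons]
        have hb := pvBLoop_bounds idx n c (l - 1) r (by omega) h4
        have hIH := ih (l - 1) r (by omega) (by omega) h3 h4
        have hsplit : PySem.List.pyRange ((pvBLoop idx n c (l - 1, r)).1 + 1) (l + 1) 1
            = PySem.List.pyRange ((pvBLoop idx n c (l - 1, r)).1 + 1) l 1 ++ [l] := by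
          rw [← PySem.List.pyRange_one_succ_right (by omega)]
        rw [hsplit, List.append_assoc, List.singleton_append]
        refine List.Perm.trans (List.Perm.cons l ?_) List.perm_middle.symm
        have : PySem.List.pyRange ((pvBLoop idx n c (l - 1, r)).1 + 1) (l - 1 + 1) 1
            = PySem.List.pyRange ((pvBLoop idx n c (l - 1, r)).1 + 1) l 1 := by congr 1; omega
        rw [this] at hIH
        exact hIH
      · -- take the right pointer
        have hr : r < n := by omega
        have hrec : pvBLoop idx n (c + 1) (l, r) = pvBLoop idx n c (l, r + 1) := by
          conv_lhs => rw [pvBLoop]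
          rw [if_pos hc, if_neg hin]
        rw [hrec, pvSorted_cands_cons_right idx n l r h2 h3 hr hin, List.take_succ_cons]
        have hb := pvBLoop_bounds idx n c l (r + 1) h1 (by omega)
        have hIH := ih l (r + 1) h1 h2 (by omega) (by omega)
        have hsplit : PySem.List.pyRange r ((pvBLoop idx n c (l, r + 1)).2) 1
            = r :: PySem.List.pyRange (r + 1) ((pvBLoop idx n c (l, r + 1)).2) 1 :=
          PySem.List.pyRange_one_cons (by omega)
        rw [hsplit]
        exact List.Perm.trans (List.Perm.cons r hIH) List.perm_middle.symm
    · -- pool exhausted: l = -1 and r = n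
      have hl : l = -1 := by omega
      have hrn : r = n := by omega
      have hrec : pvBLoop idx n (c + 1) (l, r) = (l, r) := by
        conv_lhs => rw [pvBLoop]
        rw [if_neg hc]
      rw [hrec]
      subst hl hrn
      simp [pvCands, PySem.List.pyRange_one_eq_nil, PySem.List.sorted]

-- a range of in-bounds indices, read through pyGetD, is the corresponding slice
theorem pvMap_get_pyRange (xs : List String) (a b : Int) (h0 : 0 ≤ a) (hab : a ≤ b)
    (hbn : b ≤ (xs.length : Int)) :
    (PySem.List.pyRange a b 1).map (fun j => PySem.List.pyGetD xs j "")
      = PySem.List.slice xs (some a) (some b) := by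
  have hsplit := PySem.List.pyRange_one_append a b (xs.length : Int) hab hbn
  have hlen : ((PySem.List.pyRange a b 1).map (fun j => PySem.List.pyGetD xs j "")).length
      = (b - a).toNat := by
    rw [List.length_map, PySem.List.length_pyRange_one]
  have hdrop : ((PySem.List.pyRange a ((xs.length : Int)) 1).map (fun j => PySem.List.pyGetD xs j ""))
      = xs.drop a.toNat := by
    have := PySem.List.map_pyGetD_pyRange xs "" h0
    simpa [PySem.List.len] using this
  have : ((PySem.List.pyRange a b 1).map (fun j => PySem.List.pyGetD xs j "")) ++
      ((PySem.List.pyRange b ((xs.length : Int)) 1).map (fun j => PySem.List.pyGetD xs j ""))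
      = xs.drop a.toNat := by
    rw [← List.map_append, ← hsplit, hdrop]
  calc (PySem.List.pyRange a b 1).map (fun j => PySem.List.pyGetD xs j "")
      = ((PySem.List.pyRange a b 1).map (fun j => PySem.List.pyGetD xs j "") ++
          (PySem.List.pyRange b ((xs.length : Int)) 1).map (fun j => PySem.List.pyGetD xs j "")).take
            ((b - a).toNat) := (List.take_left' hlen).symm
    _ = (xs.drop a.toNat).take ((b - a).toNat) := by rw [this]
    _ = PySem.List.slice xs (some a) (some b) := by
          rw [PySem.List.slice_toNat xs h0 (by omega)]
          congr 1
          omega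

-- A's ordered_indices pool is B's initial candidate pool
theorem pvFilter_eq_cands (n idx : Int) (h0 : 0 ≤ idx) (hn : idx < n) :
    (PySem.List.pyRange 0 n 1).filter (fun j => decide (j ≠ idx))
      = pvCands n (idx - 1) (idx + 1) := by
  have hsplit : PySem.List.pyRange 0 n 1
      = PySem.List.pyRange 0 idx 1 ++ ([idx] ++ PySem.List.pyRange (idx + 1) n 1) := by
    rw [PySem.List.pyRange_one_append 0 idx n h0 (by omega),
      PySem.List.pyRange_one_append idx (idx + 1) n (by omega) (by omega),
      PySem.List.pyRange_one_singleton]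
  rw [hsplit, List.filter_append, List.filter_append]
  have h1 : (PySem.List.pyRange 0 idx 1).filter (fun j => decide (j ≠ idx))
      = PySem.List.pyRange 0 idx 1 := by
    rw [List.filter_eq_self]
    intro a ha
    rw [PySem.List.mem_pyRange_one] at ha
    simp; omega
  have h2 : ([idx] : List Int).filter (fun j => decide (j ≠ idx)) = [] := by simp
  have h3 : (PySem.List.pyRange (idx + 1) n 1).filter (fun j => decide (j ≠ idx))
      = PySem.List.pyRange (idx + 1) n 1 := by
    rw [List.filter_eq_self]
    intro a ha
    rw [PySem.List.mem_pyRange_one] at ha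
    simp; omega
  rw [h1, h2, h3]
  unfold pvCands
  congr 2
  omega

-- the min_count branch of A never changes the selection
theorem pvBranch_collapse (xs : List Int) :
    (if (xs.take 5).length < 3 then xs else xs.take 5) = xs.take 5 := by
  split_ifs with h
  · rw [List.length_take] at h
    exact (List.take_of_length_le (by omega)).symm
  · rfl

-- ===== VERDICT (by name: the statement is the Claim_ definition above) =====
theorem get_adjacent_cities_spec : Claim_equal_get_adjacent_cities := by
  intro city_slug city_slugs _
  unfold Spec_get_adjacent_cities get_adjacent_cities get_adjacent_cities_alt
  by_cases hm : city_slug ∈ city_slugs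
  · rw [if_neg (by simpa using hm)]
    obtain ⟨i, hi⟩ : ∃ i, PySem.List.index? city_slugs city_slug = some i := by
      have := (PySem.List.index?_isSome_iff city_slugs city_slug).mpr hm
      exact Option.isSome_iff_exists.mp this
    obtain ⟨hk, -, -⟩ := PySem.List.getElem_of_index?_eq_some hi
    rw [hi]
    simp only []
    set idx : Int := (i : Int) with hidx
    set n : Int := (city_slugs.length : Int) with hn
    have h0 : 0 ≤ idx := by rw [hidx]; exact Int.natCast_nonneg i
    have h1 : idx < n := by rw [hidx, hn]; exact_mod_cast hk
    -- A's pipeline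
    rw [pvFilter_eq_cands n idx h0 h1, pvSorted2_eq_sorted, pvBranch_collapse]
    have hb := pvBLoop_bounds idx n 5 (idx - 1) (idx + 1) (by omega) (by omega)
    have hperm := pvTake_perm idx n 5 (idx - 1) (idx + 1) (by omega) (by omega) (by omega) (by omega)
    set lf : Int := (pvBLoop idx n 5 (idx - 1, idx + 1)).1 with hlf
    set rf : Int := (pvBLoop idx n 5 (idx - 1, idx + 1)).2 with hrf
    have heq : idx - 1 + 1 = idx := by omega
    rw [heq] at hperm
    have hVpair : (PySem.List.pyRange (lf + 1) idx 1 ++ PySem.List.pyRange (idx + 1) rf 1).Pairwise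
        (fun a b => a < b) := by
      rw [List.pairwise_append]
      refine ⟨PySem.List.pairwise_lt_pyRange_one _ _, PySem.List.pairwise_lt_pyRange_one _ _, ?_⟩
      intro a ha b hb
      rw [PySem.List.mem_pyRange_one] at ha hb
      omega
    have hsorted : PySem.List.sorted
        ((PySem.List.sorted (pvCands n (idx - 1) (idx + 1)) (pvKey idx) false).take 5)
          (fun j => j) false
        = PySem.List.pyRange (lf + 1) idx 1 ++ PySem.List.pyRange (idx + 1) rf 1 :=
      PySem.List.sorted_eq_of_perm_of_pairwise_lt _ _ _ hperm.symm hVpair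
    rw [hsorted, List.map_append]
    rw [pvMap_get_pyRange city_slugs (lf + 1) idx (by omega) (by omega) (by omega),
      pvMap_get_pyRange city_slugs (idx + 1) rf (by omega) (by omega) (by omega)]
  · rw [if_pos (by simpa using hm), (PySem.List.index?_eq_none_iff city_slugs city_slug).mpr hm]
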